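-- pv_equiv track=rewrite | github.com/JsebastianUVPRQ/leetcode_solutions | 2_numbers_on_linked_list.py | Equalroewcount
-- ===== SOURCE A (Python) =====
-- def Equalroewcount(grid):
--     '''
--     Time complexity: O(n)
--     '''
--     n = len(grid)
--     count = 0
--     rows = {}
--     for i in range(n):
--         if tuple(grid[i]) in rows:
--             count += rows[tuple(grid[i])]
--             rows[tuple(grid[i])] += 1
--         else:
--             rows[tuple(grid[i])] = 1
--     return count
-- ===== SOURCE B (Python) =====
-- def Equalroewcount(grid):
--     # Brute-force pairwise counting, no hash map: repeatedly take the first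
--     # remaining row and count its occurrences among the rows after it.
--     total = 0
--     rest = list(grid)
--     while rest:
--         row = rest.pop(0)
--         total += rest.count(row)
--     return total
-- ===== Notes on version B (the rewrite author's own statement) =====
-- stated objective: alternative
-- what changed: Drops the hash map entirely: instead of a dict of row multiplicities with a running total, B counts equal pairs directly by repeatedly popping the first remaining row and adding its occurrence count among the rows after it (brute-force pairwise counting, no dictionary).
import Mathlib
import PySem

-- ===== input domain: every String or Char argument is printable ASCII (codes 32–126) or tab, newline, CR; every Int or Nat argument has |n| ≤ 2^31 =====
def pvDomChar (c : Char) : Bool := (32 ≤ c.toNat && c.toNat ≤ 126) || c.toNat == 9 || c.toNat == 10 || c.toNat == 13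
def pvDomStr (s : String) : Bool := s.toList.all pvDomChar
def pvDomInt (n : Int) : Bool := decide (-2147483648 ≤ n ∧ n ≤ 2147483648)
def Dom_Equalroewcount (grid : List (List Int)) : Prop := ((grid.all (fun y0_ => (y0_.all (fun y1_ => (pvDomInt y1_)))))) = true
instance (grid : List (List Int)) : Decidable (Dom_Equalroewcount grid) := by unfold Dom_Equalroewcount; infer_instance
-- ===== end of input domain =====

-- B drops A's hash map of multiplicities and counts equal pairs directly: pop the first
-- remaining row, add its occurrence count among the rows after it (alternative algorithm).

-- ===== PORT A =====
-- A's loop 'for i in range(n)' over grid[i]: a running count and the dict `rows`.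
def EqA_loop : List (List Int) → Int → PySem.Dict (List Int) Int → Int
  | [], count, _ => count
  | r :: rest, count, rows =>
    match rows.get? r with
    | some v => EqA_loop rest (count + v) (rows.insert r (v + 1))
    | none   => EqA_loop rest count (rows.insert r 1)

def Equalroewcount (grid : List (List Int)) : Int := EqA_loop grid 0 PySem.Dict.empty

-- ===== PORT B =====
-- B's while-loop: rest.pop(0) is the head, total += rest.count(row) on the tail.
def EqB_loop : List (List Int) → Int → Int
  | [], total => total
  | row :: rest, total => EqB_loop rest (total + (PySem.List.count rest row : Int))

def Equalroewcount_alt (grid : List (List Int)) : Int := EqB_loop grid 0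

-- ===== PRECONDITION & SPEC =====
def Spec_Equalroewcount (grid : List (List Int)) (out : Int) : Prop := out = Equalroewcount_alt grid
instance (grid : List (List Int)) (out : Int) : Decidable (Spec_Equalroewcount grid out) := by unfold Spec_Equalroewcount; infer_instance

-- ===== CLAIM =====
def Claim_equal_Equalroewcount : Prop := ∀ (grid : List (List Int)), Dom_Equalroewcount grid → Spec_Equalroewcount grid (Equalroewcount grid)

-- ===== LEMMAS AND PROOFS =====

-- number of ordered pairs i<j with equal rows, the pure form of B's loop
def EqP : List (List Int) → Int
  | [] => 0
  | r :: rest => (List.count r rest : Int) + EqP rest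

-- B's loop is the accumulator form of EqP
theorem eqB_loop_eq : ∀ (grid : List (List Int)) (t : Int), EqB_loop grid t = t + EqP grid := by
  intro grid
  induction grid with
  | nil => intro t; simp [EqB_loop, EqP]
  | cons r rest ih =>
    intro t
    simp only [EqB_loop, EqP, ih, PySem.List.count_eq]
    ring

-- cross pairs between an already-seen multiset and the remaining rows
def EqCross (seen grid : List (List Int)) : Int :=
  (grid.map (fun x => (List.count x seen : Int))).sum

-- the dict holds exactly the multiplicities of the seen rows
def EqInv (d : PySem.Dict (List Int) Int) (seen : List (List Int)) : Prop :=
  ∀ r, d.get? r = if List.count r seen = 0 then none else some ((List.count r seen : Int))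

theorem eqInv_step (d : PySem.Dict (List Int) Int) (seen : List (List Int)) (r : List Int)
    (h : EqInv d seen) (w : Int) (hw : w = (List.count r seen : Int) + 1) :
    EqInv (d.insert r w) (seen ++ [r]) := by
  intro x
  rw [PySem.Dict.get?_insert]
  by_cases hx : x = r
  · subst hx
    simp [List.count_append, hw]
  · have hcount : List.count x (seen ++ [r]) = List.count x seen := by
      simp [List.count_append, Ne.symm hx]
    rw [hcount, h x]
    simp [hx]

theorem eqCross_append (seen grid : List (List Int)) (r : List Int) :
    EqCross (seen ++ [r]) grid = EqCross seen grid + (List.count r grid : Int) := by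
  induction grid with
  | nil => simp [EqCross]
  | cons g rest ih =>
    simp only [EqCross, List.map_cons, List.sum_cons] at *
    rw [ih]
    by_cases hg : g = r
    · subst hg
      simp [List.count_append]
      ring
    · have h0 : List.count g [r] = 0 := List.count_eq_zero.mpr (by simp [hg])
      have h1 : List.count g (seen ++ [r]) = List.count g seen := by
        rw [List.count_append, h0, Nat.add_zero]
      have h2 : List.count r (g :: rest) = List.count r rest := by
        simp [hg]
      rw [h1, h2]
      ring

-- loop invariant: A's loop returns the accumulator plus the pairs within grid
-- plus the cross pairs between the seen prefix and grid
theorem eqA_loop_eq : ∀ (grid : List (List Int)) (c : Int) (d : PySem.Dict (List Int) Int)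
    (seen : List (List Int)), EqInv d seen →
    EqA_loop grid c d = c + EqP grid + EqCross seen grid := by
  intro grid
  induction grid with
  | nil => intro c d seen _; simp [EqA_loop, EqP, EqCross]
  | cons r rest ih =>
    intro c d seen hinv
    have hget := hinv r
    simp only [EqA_loop]
    by_cases h0 : List.count r seen = 0
    · rw [hget, if_pos h0]
      have hinv' : EqInv (d.insert r 1) (seen ++ [r]) :=
        eqInv_step d seen r hinv 1 (by rw [h0]; simp)
      rw [ih c _ _ hinv', eqCross_append]
      simp only [EqP, EqCross, List.map_cons, List.sum_cons]
      rw [h0]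
      ring
    · rw [hget, if_neg h0]
      dsimp only
      have hinv' : EqInv (d.insert r ((List.count r seen : Int) + 1)) (seen ++ [r]) :=
        eqInv_step d seen r hinv _ rfl
      rw [ih _ _ _ hinv', eqCross_append]
      simp only [EqP, EqCross, List.map_cons, List.sum_cons]
      ring

-- ===== VERDICT =====
theorem Equalroewcount_spec : Claim_equal_Equalroewcount := by
  intro grid _
  unfold Spec_Equalroewcount Equalroewcount Equalroewcount_alt
  have hinv : EqInv PySem.Dict.empty [] := by
    intro r; simp [PySem.Dict.get?_empty]
  rw [eqA_loop_eq grid 0 PySem.Dict.empty [] hinv, eqB_loop_eq grid 0]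
  simp [EqCross]
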